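-- pv_equiv track=rewrite | github.com/IWLeng/Scripts | Api_google_translate_for_txt/Api_google_translate_txt.py | split_into_paragraphs
-- ===== SOURCE A (Python) =====
-- def split_into_paragraphs(text, max_paragraph_length=500):
--     """Split text into paragraphs of reasonable length for translation."""
--     paragraphs = []
--     current_paragraph = ""
--
--     for line in text.split('\n'):
--         line = line.strip()
--         if not line:
--             if current_paragraph:
--                 paragraphs.append(current_paragraph)
--                 current_paragraph = ""
--             paragraphs.append("")  # Empty line
--             continue
--
--         if len(current_paragraph) + len(line) + 1 > max_paragraph_length:
--             if current_paragraph: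
--                 paragraphs.append(current_paragraph)
--                 current_paragraph = line
--             else:
--                 paragraphs.append(line)
--         else:
--             if current_paragraph:
--                 current_paragraph += "\n" + line
--             else:
--                 current_paragraph = line
--
--     if current_paragraph:
--         paragraphs.append(current_paragraph)
--
--     return paragraphs
-- ===== SOURCE B (Python) =====
-- from itertools import groupby
--
--
-- def _pack(lines, max_len):
--     """Greedy-pack a run of non-empty lines into paragraphs."""
--     parts = []
--     cur = ""
--     for line in lines:
--         if len(cur) + len(line) + 1 > max_len:
--             if cur:
--                 parts.append(cur)
--                 cur = line
--             else:
--                 parts.append(line)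
--         elif cur:
--             cur += "\n" + line
--         else:
--             cur = line
--     if cur:
--         parts.append(cur)
--     return parts
--
--
-- def split_into_paragraphs(text, max_paragraph_length=500):
--     """Split text into paragraphs of reasonable length for translation."""
--     stripped = [line.strip() for line in text.split('\n')]
--     result = []
--     for is_empty, group in groupby(stripped, key=lambda l: l == ''):
--         group = list(group)
--         if is_empty:
--             result += group  # one "" per blank line
--         else:
--             result += _pack(group, max_paragraph_length)
--     return result
-- ===== Notes on version B (the rewrite author's own statement) =====
-- stated objective: alternative
-- what changed: Replaced A's single stateful loop threading (paragraphs, current_paragraph) across blank and non-blank lines by a two-stage decomposition: strip all lines, group consecutive runs by emptiness with itertools.groupby, emit blank runs verbatim and greedy-pack each non-empty run independently with a standalone packer.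
import Mathlib
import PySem

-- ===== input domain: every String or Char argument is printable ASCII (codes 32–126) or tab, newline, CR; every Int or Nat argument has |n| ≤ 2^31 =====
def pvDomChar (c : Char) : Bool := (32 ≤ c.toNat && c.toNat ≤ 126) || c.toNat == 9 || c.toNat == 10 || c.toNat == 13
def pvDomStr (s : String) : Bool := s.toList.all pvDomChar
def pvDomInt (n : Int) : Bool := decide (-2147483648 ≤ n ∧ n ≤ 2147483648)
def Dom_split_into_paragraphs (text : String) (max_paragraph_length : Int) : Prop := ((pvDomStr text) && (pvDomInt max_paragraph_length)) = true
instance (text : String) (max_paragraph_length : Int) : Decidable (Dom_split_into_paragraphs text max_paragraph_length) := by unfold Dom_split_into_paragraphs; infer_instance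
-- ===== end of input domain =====

-- B regroups A's single stateful loop as: strip all lines, group consecutive runs by
-- emptiness (itertools.groupby), emit blank runs verbatim and greedy-pack each non-empty
-- run independently (objective: alternative decomposition, same cost; return value only).

-- ===== PORT A =====
-- one loop step of A over state (paragraphs, current_paragraph)
def pvStepA (M : Int) (st : List String × String) (line : String) : List String × String :=
  let l := PySem.Str.strip line
  if l == "" then
    ((st.1 ++ (if st.2 == "" then [] else [st.2])) ++ [""], "")
  else if PySem.Str.len st.2 + PySem.Str.len l + 1 > M then
    (if st.2 == "" then (st.1 ++ [l], st.2) else (st.1 ++ [st.2], l))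
  else
    (if st.2 == "" then (st.1, l) else (st.1, st.2 ++ "\n" ++ l))

def split_into_paragraphs (text : String) (max_paragraph_length : Int) : List String :=
  let st := ((PySem.Str.split? text "\n").getD []).foldl (pvStepA max_paragraph_length) ([], "")
  st.1 ++ (if st.2 == "" then [] else [st.2])

-- ===== PORT B =====
-- _pack: greedy-pack a run of non-empty lines (Source B's loop as structural recursion over (lines, cur))
def pvPack (M : Int) : List String → String → List String
  | [], cur => if cur == "" then [] else [cur]
  | line :: ls, cur =>
    if PySem.Str.len cur + PySem.Str.len line + 1 > M then
      (if cur == "" then line :: pvPack M ls cur else cur :: pvPack M ls line)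
    else
      (if cur == "" then pvPack M ls line else pvPack M ls (cur ++ "\n" ++ line))

-- itertools.groupby on (l == ''): maximal consecutive runs with equal key
def pvGroupRuns : List String → List (List String)
  | [] => []
  | l :: ls =>
    (l :: ls.takeWhile (fun x => (x == "") == (l == ""))) ::
      pvGroupRuns (ls.dropWhile (fun x => (x == "") == (l == "")))
termination_by ls => ls.length
decreasing_by
  simpa using Nat.lt_succ_of_le (List.length_dropWhile_le _ _)

def split_into_paragraphs_alt (text : String) (max_paragraph_length : Int) : List String :=
  let stripped := ((PySem.Str.split? text "\n").getD []).map PySem.Str.strip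
  (pvGroupRuns stripped).flatMap
    (fun g => if g.headD "" == "" then g else pvPack max_paragraph_length g "")

-- ===== PRECONDITION & SPEC =====
def Spec_split_into_paragraphs (text : String) (max_paragraph_length : Int) (out : List String) : Prop := out = split_into_paragraphs_alt text max_paragraph_length
instance (text : String) (max_paragraph_length : Int) (out : List String) : Decidable (Spec_split_into_paragraphs text max_paragraph_length out) := by unfold Spec_split_into_paragraphs; infer_instance

-- ===== CLAIM (what is proved, stated in full; the proofs are below) =====
def Claim_equal_split_into_paragraphs : Prop := ∀ (text : String) (max_paragraph_length : Int), Dom_split_into_paragraphs text max_paragraph_length → Spec_split_into_paragraphs text max_paragraph_length (split_into_paragraphs text max_paragraph_length)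

-- ===== LEMMAS AND PROOFS =====

-- A's remaining output from current-paragraph state cur (proof-side characterisation of A's loop)
def pvRest (M : Int) : List String → String → List String
  | [], cur => if cur == "" then [] else [cur]
  | line :: ls, cur =>
    let l := PySem.Str.strip line
    if l == "" then
      ((if cur == "" then [] else [cur]) ++ [""]) ++ pvRest M ls ""
    else if PySem.Str.len cur + PySem.Str.len l + 1 > M then
      (if cur == "" then l :: pvRest M ls cur else cur :: pvRest M ls l)
    else
      (if cur == "" then pvRest M ls l else pvRest M ls (cur ++ "\n" ++ l))

-- the same over already-stripped lines
def pvRestS (M : Int) : List String → String → List String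
  | [], cur => if cur == "" then [] else [cur]
  | l :: ls, cur =>
    if l == "" then
      ((if cur == "" then [] else [cur]) ++ [""]) ++ pvRestS M ls ""
    else if PySem.Str.len cur + PySem.Str.len l + 1 > M then
      (if cur == "" then l :: pvRestS M ls cur else cur :: pvRestS M ls l)
    else
      (if cur == "" then pvRestS M ls l else pvRestS M ls (cur ++ "\n" ++ l))

-- flush the final current_paragraph (the code after A's loop)
def pvFinish (st : List String × String) : List String :=
  st.1 ++ (if st.2 == "" then [] else [st.2])

theorem pvFoldA_eq_rest (M : Int) (ls : List String) (acc : List String) (cur : String) :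
    pvFinish (ls.foldl (pvStepA M) (acc, cur)) = acc ++ pvRest M ls cur := by
  induction ls generalizing acc cur with
  | nil => by_cases h : (cur == "") = true <;> simp [pvFinish, pvRest, h]
  | cons line ls ih =>
    simp only [List.foldl_cons, pvRest, pvStepA]
    split_ifs <;> rw [ih] <;> simp [List.append_assoc]

theorem pvRest_eq_restS (M : Int) (ls : List String) (cur : String) :
    pvRest M ls cur = pvRestS M (ls.map PySem.Str.strip) cur := by
  induction ls generalizing cur with
  | nil => rfl
  | cons line ls ih =>
    simp only [List.map_cons, pvRest, pvRestS]
    split_ifs <;> simp [ih]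

theorem pvRestS_blank_run (M : Int) (run tail : List String)
    (h : ∀ x ∈ run, x = "") :
    pvRestS M (run ++ tail) "" = run ++ pvRestS M tail "" := by
  induction run with
  | nil => rfl
  | cons r rs ih =>
    have hr : r = "" := h r (by simp)
    simp only [List.cons_append, pvRestS, hr]
    simp [ih (fun x hx => h x (by simp [hx]))]

theorem pvRestS_pack_run (M : Int) (g tail : List String) (cur : String)
    (hg : ∀ x ∈ g, x ≠ "") (ht : tail = [] ∨ ∃ ts, tail = "" :: ts) :
    pvRestS M (g ++ tail) cur = pvPack M g cur ++ pvRestS M tail "" := by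
  induction g generalizing cur with
  | nil =>
    rcases ht with h | ⟨ts, h⟩ <;> subst h
    · by_cases hc : (cur == "") = true <;> simp [pvRestS, pvPack, hc]
    · by_cases hc : (cur == "") = true <;> simp [pvRestS, pvPack, hc]
  | cons l ls ih =>
    have hl : (l == "") = false := by simpa using hg l (by simp)
    have hg' : ∀ x ∈ ls, x ≠ "" := fun x hx => hg x (by simp [hx])
    simp only [List.cons_append, pvRestS, pvPack, hl, Bool.false_eq_true, if_false]
    split_ifs <;> simp [ih _ hg']

theorem pvRestS_eq_groups (M : Int) : ∀ n (L : List String), L.length ≤ n →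
    pvRestS M L "" = (pvGroupRuns L).flatMap
      (fun g => if g.headD "" == "" then g else pvPack M g "") := by
  intro n
  induction n with
  | zero =>
    intro L hL
    rw [List.length_eq_zero_iff.mp (Nat.le_zero.mp hL)]
    simp [pvRestS, pvGroupRuns]
  | succ n ih =>
    intro L hL
    match L with
    | [] => simp [pvRestS, pvGroupRuns]
    | l :: ls =>
      rw [pvGroupRuns]
      set p := fun x => (x == "") == (l == "") with hp
      have hsplit : l :: ls = (l :: ls.takeWhile p) ++ ls.dropWhile p := by
        simp [List.takeWhile_append_dropWhile]
      have hlen : (ls.dropWhile p).length ≤ n := by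
        have := List.length_dropWhile_le p ls
        simp at hL; omega
      by_cases hle : l = ""
      · subst hle
        have hall : ∀ x ∈ ("" : String) :: ls.takeWhile p, x = "" := by
          intro x hx
          rcases List.mem_cons.mp hx with h | h
          · exact h
          · have := List.mem_takeWhile_imp h
            simpa [hp] using this
        rw [List.flatMap_cons, if_pos (by simp)]
        conv_lhs => rw [show ("" : String) :: ls = (("" : String) :: ls.takeWhile p) ++ ls.dropWhile p from hsplit]
        rw [pvRestS_blank_run M _ _ hall, ih _ hlen]
      · have hlb : (l == "") = false := by simpa using hle
        have hgne : ∀ x ∈ l :: ls.takeWhile p, x ≠ "" := by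
          intro x hx
          rcases List.mem_cons.mp hx with h | h
          · simpa [h] using hle
          · have := List.mem_takeWhile_imp h
            simp only [hp, hlb] at this
            simpa using of_decide_eq_true (by simpa using this)
        have htail : ls.dropWhile p = [] ∨ ∃ ts, ls.dropWhile p = "" :: ts := by
          match hd : ls.dropWhile p with
          | [] => exact Or.inl rfl
          | t :: ts =>
            refine Or.inr ⟨ts, ?_⟩
            have hne : ls.dropWhile p ≠ [] := by simp [hd]
            have hpt := List.head_dropWhile_not p hne
            simp only [hd, List.head_cons] at hpt
            simp only [hp, hlb] at hpt
            simpa using hpt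
        rw [List.flatMap_cons, if_neg (by simpa using hle)]
        conv_lhs => rw [show l :: ls = (l :: ls.takeWhile p) ++ ls.dropWhile p from hsplit]
        rw [pvRestS_pack_run M _ _ _ hgne htail, ih _ hlen]

-- ===== VERDICT (by name: the statement is the Claim_ definition above) =====
theorem split_into_paragraphs_spec : Claim_equal_split_into_paragraphs := by
  intro text M _
  show split_into_paragraphs text M = split_into_paragraphs_alt text M
  have hA : split_into_paragraphs text M
      = [] ++ pvRest M ((PySem.Str.split? text "\n").getD []) "" :=
    pvFoldA_eq_rest M ((PySem.Str.split? text "\n").getD []) [] ""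
  rw [hA, List.nil_append, pvRest_eq_restS,
    pvRestS_eq_groups M (((PySem.Str.split? text "\n").getD []).map PySem.Str.strip).length _ le_rfl]
  rfl
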